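-- pv_equiv track=rewrite | github.com/luminousphotonics/photonics | mla22.py | generate_light_sources
-- ===== SOURCE A (Python) =====
-- def generate_light_sources(num_layers, center_x, center_y, spacing_x, spacing_y):
--     """
--     Generates light source coordinates for concentric square layers.
--     """
--     light_sources = []
--     for n in range(num_layers):
--         layer_sources = []
--         for x in range(-n, n + 1):
--             for y in range(-n, n + 1):
--                 if abs(x) == n or abs(y) == n:  # On the edge of the square
--                     layer_sources.append((center_x + x * spacing_x, center_y + y * spacing_y))
--         light_sources.append(layer_sources)
--     return light_sources
-- ===== SOURCE B (Python) =====
-- def generate_light_sources(num_layers, center_x, center_y, spacing_x, spacing_y):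
--     """
--     Generates light source coordinates for concentric square layers,
--     emitting only the edge points of each ring directly (no full-square scan).
--     """
--     light_sources = []
--     for n in range(num_layers):
--         layer = []
--         for x in range(-n, n + 1):
--             px = center_x + x * spacing_x
--             if x == -n or x == n:
--                 # left/right column: full vertical run
--                 for y in range(-n, n + 1):
--                     layer.append((px, center_y + y * spacing_y))
--             else:
--                 # interior column: only top and bottom edge points
--                 layer.append((px, center_y - n * spacing_y))
--                 layer.append((px, center_y + n * spacing_y))
--         light_sources.append(layer)
--     return light_sources
-- ===== Notes on version B (the rewrite author's own statement) =====
-- stated objective: faster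
-- what changed: Instead of scanning the full (2n+1)x(2n+1) square per layer and filtering by an edge test, B emits only the ring's edge points directly: full columns at x=+-n, and just the two edge points (y=-n and y=n) for interior columns, in the same scan order.
import Mathlib
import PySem

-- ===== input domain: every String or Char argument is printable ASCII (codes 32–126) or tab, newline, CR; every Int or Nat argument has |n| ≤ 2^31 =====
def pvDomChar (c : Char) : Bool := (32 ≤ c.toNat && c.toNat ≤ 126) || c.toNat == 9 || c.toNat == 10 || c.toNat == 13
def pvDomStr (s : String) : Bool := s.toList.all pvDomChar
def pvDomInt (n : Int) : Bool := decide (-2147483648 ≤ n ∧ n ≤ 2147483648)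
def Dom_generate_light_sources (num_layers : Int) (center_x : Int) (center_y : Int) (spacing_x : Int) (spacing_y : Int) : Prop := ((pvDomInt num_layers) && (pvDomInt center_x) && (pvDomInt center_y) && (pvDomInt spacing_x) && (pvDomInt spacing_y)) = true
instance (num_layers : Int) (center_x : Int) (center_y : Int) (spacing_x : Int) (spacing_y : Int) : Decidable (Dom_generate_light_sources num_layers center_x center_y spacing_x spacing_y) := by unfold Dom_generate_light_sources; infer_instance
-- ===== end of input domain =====

-- B emits only each ring's edge points directly instead of filtering a full-square scan (asymptotically faster; same values in same order).
-- ===== PORT A =====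
def generate_light_sources (num_layers : Int) (center_x : Int) (center_y : Int) (spacing_x : Int) (spacing_y : Int) : List (List (Int × Int)) :=
  (PySem.List.pyRange 0 num_layers 1).foldl (fun light_sources n =>
    light_sources ++
      [ (PySem.List.pyRange (-n) (n + 1) 1).foldl (fun layer_sources x =>
          (PySem.List.pyRange (-n) (n + 1) 1).foldl (fun layer_sources y =>
            if |x| = n ∨ |y| = n then
              layer_sources ++ [(center_x + x * spacing_x, center_y + y * spacing_y)]
            else layer_sources) layer_sources) [] ]) []

-- ===== PORT B =====
-- one ring: full columns at x = ±n, two edge points for interior columns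
def pvRingB (n center_x center_y spacing_x spacing_y : Int) : List (Int × Int) :=
  (PySem.List.pyRange (-n) (n + 1) 1).foldl (fun layer x =>
    let px := center_x + x * spacing_x
    if x = -n ∨ x = n then
      layer ++ (PySem.List.pyRange (-n) (n + 1) 1).map (fun y => (px, center_y + y * spacing_y))
    else
      layer ++ [(px, center_y - n * spacing_y), (px, center_y + n * spacing_y)]) []

def generate_light_sources_alt (num_layers : Int) (center_x : Int) (center_y : Int) (spacing_x : Int) (spacing_y : Int) : List (List (Int × Int)) :=
  (PySem.List.pyRange 0 num_layers 1).foldl (fun light_sources n =>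
    light_sources ++ [pvRingB n center_x center_y spacing_x spacing_y]) []

-- ===== PRECONDITION & SPEC =====
def Spec_generate_light_sources (num_layers : Int) (center_x : Int) (center_y : Int) (spacing_x : Int) (spacing_y : Int) (out : List (List (Int × Int))) : Prop := out = generate_light_sources_alt num_layers center_x center_y spacing_x spacing_y
instance (num_layers : Int) (center_x : Int) (center_y : Int) (spacing_x : Int) (spacing_y : Int) (out : List (List (Int × Int))) : Decidable (Spec_generate_light_sources num_layers center_x center_y spacing_x spacing_y out) := by unfold Spec_generate_light_sources; infer_instance

-- ===== CLAIM (what is proved, stated in full; the proofs are below) =====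
def Claim_equal_generate_light_sources : Prop := ∀ (num_layers : Int) (center_x : Int) (center_y : Int) (spacing_x : Int) (spacing_y : Int), Dom_generate_light_sources num_layers center_x center_y spacing_x spacing_y → Spec_generate_light_sources num_layers center_x center_y spacing_x spacing_y (generate_light_sources num_layers center_x center_y spacing_x spacing_y)

-- ===== LEMMAS AND PROOFS =====

-- ===== VERDICT (by name: the statement is the Claim_ definition above) =====
-- A's ring n (n ≥ 0) equals B's ring n.
theorem ring_eq (n cx cy sx sy : Int) (hn : 0 ≤ n) :
    (PySem.List.pyRange (-n) (n + 1) 1).foldl (fun layer_sources x =>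
      (PySem.List.pyRange (-n) (n + 1) 1).foldl (fun layer_sources y =>
        if |x| = n ∨ |y| = n then
          layer_sources ++ [(cx + x * sx, cy + y * sy)]
        else layer_sources) layer_sources) [] = pvRingB n cx cy sx sy := by
  unfold pvRingB
  rw [PySem.List.foldl_congr_mem (g := fun (layer : List (Int × Int)) x =>
        layer ++ ((PySem.List.pyRange (-n) (n + 1) 1).filter
          (fun y => decide (|x| = n ∨ |y| = n))).map (fun y => (cx + x * sx, cy + y * sy)))]
  · apply PySem.List.foldl_congr_mem
    intro layer x hx
    rw [PySem.List.mem_pyRange_one] at hx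
    by_cases hedge : x = -n ∨ x = n
    · simp only [hedge, if_pos]
      have habs : |x| = n := by rw [abs_eq hn]; omega
      have : ((PySem.List.pyRange (-n) (n + 1) 1).filter
          (fun y => decide (|x| = n ∨ |y| = n))) = PySem.List.pyRange (-n) (n + 1) 1 := by
        apply List.filter_eq_self.mpr
        intro y _; simp [habs]
      rw [this]
    · simp only [hedge, if_neg, not_false_iff]
      have hxlt : -n < x ∧ x < n := by
        rcases hx with ⟨h1, h2⟩; constructor <;> omega
      have hn1 : 1 ≤ n := by omega
      have habs : ¬ |x| = n := by
        rw [abs_eq hn]; omega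
      have hsplit : PySem.List.pyRange (-n) (n + 1) 1 =
          [-n] ++ PySem.List.pyRange (-n + 1) n 1 ++ [n] := by
        rw [show (n : Int) + 1 = n + 1 from rfl,
            PySem.List.pyRange_one_succ_right (by omega),
            PySem.List.pyRange_one_cons (by omega)]
        simp
      rw [hsplit]
      rw [List.filter_append, List.filter_append]
      have hmid : (PySem.List.pyRange (-n + 1) n 1).filter
          (fun y => decide (|x| = n ∨ |y| = n)) = [] := by
        apply List.filter_eq_nil_iff.mpr
        intro y hy
        rw [PySem.List.mem_pyRange_one] at hy
        have : ¬ |y| = n := by rw [abs_eq hn]; omega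
        simp [habs, this]
      rw [hmid]
      have hend : ∀ z : Int, |z| = n → ([z].filter
          (fun y => decide (|x| = n ∨ |y| = n))) = [z] := by
        intro z hz; simp [hz]
      rw [hend (-n) (by rw [abs_neg, abs_of_nonneg hn]), hend n (by rw [abs_of_nonneg hn])]
      simp
      ring_nf
  · intro layer x _
    rw [PySem.List.foldl_append_ite (p := fun y => |x| = n ∨ |y| = n)]

theorem generate_light_sources_spec : Claim_equal_generate_light_sources := by
  intro num_layers cx cy sx sy _
  unfold Spec_generate_light_sources generate_light_sources generate_light_sources_alt
  apply PySem.List.foldl_congr_mem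
  intro acc n hn
  rw [PySem.List.mem_pyRange_one] at hn
  rw [ring_eq n cx cy sx sy hn.1]
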